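-- pv_equiv track=rewrite | github.com/ngdhuy/SE_01_Python | Lab02/Module/Module07.py | find_the_second_largest
-- ===== SOURCE A (Python) =====
-- def find_the_second_largest(arr):
--     if len(arr) < 2:
--         return -1
--
--     max = 0
--     for i in range(1, len(arr)):
--         if arr[max] < arr[i]:
--             max = i
--
--     if max == 0:
--         second = 1
--     else:
--         second = 0
--
--     for i in range(0, len(arr)):
--         if (arr[second] < arr[i]) and (i != max):
--             second = i
--     return second
-- ===== SOURCE B (Python) =====
-- def find_the_second_largest(arr):
--     if len(arr) < 2:
--         return -1
--     if arr[0] < arr[1]: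
--         first, second = 1, 0
--     else:
--         first, second = 0, 1
--     for i in range(2, len(arr)):
--         if arr[first] < arr[i]:
--             second = first
--             first = i
--         elif i != first and arr[second] < arr[i]:
--             second = i
--     return second
-- ===== Notes on version B (the rewrite author's own statement) =====
-- stated objective: alternative
-- what changed: Replaces A's two sequential scans (find the max index, then rescan all elements for the runner-up) with a single pass that maintains the pair of indices (first, second) of the largest and second largest seen so far.
import Mathlib
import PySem

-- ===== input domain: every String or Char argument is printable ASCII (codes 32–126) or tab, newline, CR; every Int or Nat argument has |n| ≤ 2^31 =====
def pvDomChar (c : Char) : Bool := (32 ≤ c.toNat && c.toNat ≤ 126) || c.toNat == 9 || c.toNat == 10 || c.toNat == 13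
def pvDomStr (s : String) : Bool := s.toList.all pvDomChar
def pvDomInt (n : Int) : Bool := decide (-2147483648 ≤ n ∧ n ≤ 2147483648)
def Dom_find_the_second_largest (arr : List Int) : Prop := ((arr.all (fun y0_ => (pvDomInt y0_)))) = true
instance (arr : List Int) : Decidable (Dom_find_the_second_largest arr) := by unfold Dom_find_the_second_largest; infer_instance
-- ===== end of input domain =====

-- B merges A's two sequential scans into a single pass maintaining the index pair
-- (first, second); same return value everywhere, no speed claim.

-- ===== PORT A =====
-- arr[i]: every index used is a Nat in [0, len), where Python indexing is List.getD i 0.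
def fslGet (arr : List Int) (i : Nat) : Int := arr.getD i 0

-- first loop of A: for i in range(1, len(arr)): if arr[max] < arr[i]: max = i
def fslLoop1 (arr : List Int) : List Nat → Nat → Nat
  | [], m => m
  | i :: is, m => fslLoop1 arr is (if fslGet arr m < fslGet arr i then i else m)

-- second loop of A: for i in range(0, len(arr)): if arr[second] < arr[i] and i != max: second = i
def fslLoop2 (arr : List Int) (m : Nat) : List Nat → Nat → Nat
  | [], s => s
  | i :: is, s => fslLoop2 arr m is (if fslGet arr s < fslGet arr i ∧ i ≠ m then i else s)

def find_the_second_largest (arr : List Int) : Int :=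
  if arr.length < 2 then -1
  else
    let m := fslLoop1 arr (List.range' 1 (arr.length - 1)) 0
    let s0 : Nat := if m = 0 then 1 else 0
    let s := fslLoop2 arr m (List.range' 0 arr.length) s0
    (s : Int)

-- ===== PORT B =====
-- single loop of B over i in range(2, len(arr)), state (first, second)
def fslLoopB (arr : List Int) : List Nat → Nat × Nat → Nat × Nat
  | [], fs => fs
  | i :: is, (f, s) =>
      fslLoopB arr is
        (if fslGet arr f < fslGet arr i then (i, f)
         else if i ≠ f ∧ fslGet arr s < fslGet arr i then (f, i)
         else (f, s))

def find_the_second_largest_alt (arr : List Int) : Int :=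
  if arr.length < 2 then -1
  else
    let init : Nat × Nat := if fslGet arr 0 < fslGet arr 1 then (1, 0) else (0, 1)
    ((fslLoopB arr (List.range' 2 (arr.length - 2)) init).2 : Int)

-- ===== PRECONDITION & SPEC =====
def Spec_find_the_second_largest (arr : List Int) (out : Int) : Prop := out = find_the_second_largest_alt arr
instance (arr : List Int) (out : Int) : Decidable (Spec_find_the_second_largest arr out) := by unfold Spec_find_the_second_largest; infer_instance

-- ===== CLAIM (what is proved, stated in full; the proofs are below) =====
def Claim_equal_find_the_second_largest : Prop := ∀ (arr : List Int), Dom_find_the_second_largest arr → Spec_find_the_second_largest arr (find_the_second_largest arr)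

-- ===== LEMMAS AND PROOFS =====

-- m is the first index attaining the maximum of arr[0..k]
def IsFstMax (g : Nat → Int) (k m : Nat) : Prop :=
  m ≤ k ∧ (∀ j, j ≤ k → g j ≤ g m) ∧ (∀ j, j < m → g j < g m)

-- s is the first index ≠ m attaining the maximum of arr[0..k] \ {m}
def IsSnd (g : Nat → Int) (k m s : Nat) : Prop :=
  s ≤ k ∧ s ≠ m ∧ (∀ j, j ≤ k → j ≠ m → g j ≤ g s) ∧ (∀ j, j < s → j ≠ m → g j < g s)

theorem IsFstMax_unique {g : Nat → Int} {k m₁ m₂ : Nat}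
    (h₁ : IsFstMax g k m₁) (h₂ : IsFstMax g k m₂) : m₁ = m₂ := by
  obtain ⟨hk₁, hle₁, hlt₁⟩ := h₁
  obtain ⟨hk₂, hle₂, hlt₂⟩ := h₂
  rcases lt_trichotomy m₁ m₂ with h | h | h
  · exact absurd (hle₁ m₂ hk₂) (not_le.mpr (hlt₂ m₁ h))
  · exact h
  · exact absurd (hle₂ m₁ hk₁) (not_le.mpr (hlt₁ m₂ h))

theorem IsSnd_unique {g : Nat → Int} {k m s₁ s₂ : Nat}
    (h₁ : IsSnd g k m s₁) (h₂ : IsSnd g k m s₂) : s₁ = s₂ := by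
  obtain ⟨hk₁, hm₁, hle₁, hlt₁⟩ := h₁
  obtain ⟨hk₂, hm₂, hle₂, hlt₂⟩ := h₂
  rcases lt_trichotomy s₁ s₂ with h | h | h
  · exact absurd (hle₁ s₂ hk₂ hm₂) (not_le.mpr (hlt₂ s₁ h hm₁))
  · exact h
  · exact absurd (hle₂ s₁ hk₁ hm₁) (not_le.mpr (hlt₁ s₂ h hm₂))

theorem fslLoop1_append (arr : List Int) (l : List Nat) (i : Nat) (m : Nat) :
    fslLoop1 arr (l ++ [i]) m
      = (if fslGet arr (fslLoop1 arr l m) < fslGet arr i then i else fslLoop1 arr l m) := by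
  induction l generalizing m with
  | nil => simp [fslLoop1]
  | cons a t ih => simp [fslLoop1, ih]

theorem fslLoop2_append (arr : List Int) (m : Nat) (l : List Nat) (i : Nat) (s : Nat) :
    fslLoop2 arr m (l ++ [i]) s
      = (if fslGet arr (fslLoop2 arr m l s) < fslGet arr i ∧ i ≠ m then i
         else fslLoop2 arr m l s) := by
  induction l generalizing s with
  | nil => simp [fslLoop2]
  | cons a t ih => simp [fslLoop2, ih]

theorem fslLoopB_append (arr : List Int) (l : List Nat) (i : Nat) (fs : Nat × Nat) :
    fslLoopB arr (l ++ [i]) fs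
      = (let p := fslLoopB arr l fs
         if fslGet arr p.1 < fslGet arr i then (i, p.1)
         else if i ≠ p.1 ∧ fslGet arr p.2 < fslGet arr i then (p.1, i)
         else p) := by
  induction l generalizing fs with
  | nil => rcases fs with ⟨f, s⟩; simp [fslLoopB]
  | cons a t ih => rcases fs with ⟨f, s⟩; simp only [List.cons_append, fslLoopB, ih]

-- invariant of A's first loop
theorem fslLoop1_inv (arr : List Int) (c : Nat) :
    IsFstMax (fslGet arr) c (fslLoop1 arr (List.range' 1 c) 0) := by
  induction c with
  | zero =>
      have h0 : fslLoop1 arr (List.range' 1 0) 0 = 0 := rfl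
      rw [h0]
      refine ⟨Nat.le_refl 0, ?_, ?_⟩
      · intro j hj
        have hj0 : j = 0 := by omega
        rw [hj0]
      · intro j hj; omega
  | succ c ih =>
      have hcat : List.range' 1 (c + 1) = List.range' 1 c ++ [1 + c] := by
        simpa using (List.range'_concat (s := 1) (n := c) (step := 1))
      rw [hcat, fslLoop1_append]
      set m := fslLoop1 arr (List.range' 1 c) 0 with hm
      obtain ⟨hk, hle, hlt⟩ := ih
      by_cases h : fslGet arr m < fslGet arr (1 + c)
      · simp only [h, if_pos]
        refine ⟨by omega, ?_, ?_⟩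
        · intro j hj
          rcases Nat.lt_or_ge j (c + 1) with hj' | hj'
          · exact le_of_lt (lt_of_le_of_lt (hle j (by omega)) h)
          · have : j = 1 + c := by omega
            simp [this]
        · intro j hj
          exact lt_of_le_of_lt (hle j (by omega)) h
      · simp only [h, if_neg, not_false_iff]
        refine ⟨by omega, ?_, hlt⟩
        intro j hj
        rcases Nat.lt_or_ge j (c + 1) with hj' | hj'
        · exact hle j (by omega)
        · have : j = 1 + c := by omega
          rw [this]; exact le_of_not_gt h

-- invariant of A's second loop (m arbitrary)
theorem fslLoop2_inv (arr : List Int) (m : Nat) (c : Nat) (hc : 2 ≤ c) :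
    IsSnd (fslGet arr) (c - 1) m
      (fslLoop2 arr m (List.range' 0 c) (if m = 0 then 1 else 0)) := by
  induction c with
  | zero => omega
  | succ c ih =>
      rcases Nat.lt_or_ge c 2 with hlt2 | hge2
      · -- c + 1 = 2 : base case, compute the two steps
        have hc2 : c = 1 := by omega
        subst hc2
        have hr2 : List.range' 0 2 = [0, 1] := by decide
        rw [hr2]
        by_cases hm0 : m = 0
        · subst hm0
          have hval : fslLoop2 arr 0 [0, 1] (if (0 : Nat) = 0 then 1 else 0) = 1 := by
            simp [fslLoop2]
          rw [hval]
          refine ⟨by omega, by omega, ?_, ?_⟩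
          · intro j hj hjm
            have : j = 1 := by omega
            rw [this]
          · intro j hj hjm; omega
        · have hval : fslLoop2 arr m [0, 1] (if m = 0 then 1 else 0)
              = if fslGet arr 0 < fslGet arr 1 ∧ (1 : Nat) ≠ m then 1 else 0 := by
            rw [if_neg hm0]
            simp [fslLoop2]
          rw [hval]
          by_cases h1 : fslGet arr 0 < fslGet arr 1 ∧ (1 : Nat) ≠ m
          · rw [if_pos h1]
            refine ⟨by omega, h1.2, ?_, ?_⟩
            · intro j hj hjm; interval_cases j
              · exact le_of_lt h1.1
              · exact le_refl _
            · intro j hj hjm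
              have : j = 0 := by omega
              rw [this]; exact h1.1
          · rw [if_neg h1]
            refine ⟨by omega, Ne.symm hm0, ?_, ?_⟩
            · intro j hj hjm; interval_cases j
              · exact le_refl _
              · rcases not_and_or.mp h1 with h | h
                · exact le_of_not_gt h
                · exact absurd hjm (by simpa using h)
            · intro j hj hjm; omega
      · -- step from c to c+1, c ≥ 2
        have hcat : List.range' 0 (c + 1) = List.range' 0 c ++ [c] := by
          simpa using (List.range'_concat (s := 0) (n := c) (step := 1))
        rw [hcat, fslLoop2_append]
        obtain ⟨hk, hsm, hle, hlt⟩ := ih hge2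
        set s := fslLoop2 arr m (List.range' 0 c) (if m = 0 then 1 else 0) with hs
        by_cases h : fslGet arr s < fslGet arr c ∧ c ≠ m
        · rw [if_pos h]
          refine ⟨by omega, h.2, ?_, ?_⟩
          · intro j hj hjm
            rcases Nat.lt_or_ge j c with hj' | hj'
            · exact le_of_lt (lt_of_le_of_lt (hle j (by omega) hjm) h.1)
            · have : j = c := by omega
              rw [this]
          · intro j hj hjm
            exact lt_of_le_of_lt (hle j (by omega) hjm) h.1
        · rw [if_neg h]
          refine ⟨by omega, hsm, ?_, hlt⟩
          intro j hj hjm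
          rcases Nat.lt_or_ge j c with hj' | hj'
          · exact hle j (by omega) hjm
          · have hjc : j = c := by omega
            subst hjc
            rcases not_and_or.mp h with h' | h'
            · exact le_of_not_gt h'
            · exact absurd hjm (by simpa using h')

-- invariant of B's single loop: after range' 2 c, first/second are correct for prefix 0..c+1
theorem fslLoopB_inv (arr : List Int) (c : Nat) :
    IsFstMax (fslGet arr) (c + 1)
        (fslLoopB arr (List.range' 2 c)
          (if fslGet arr 0 < fslGet arr 1 then (1, 0) else (0, 1))).1
    ∧ IsSnd (fslGet arr) (c + 1)
        (fslLoopB arr (List.range' 2 c)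
          (if fslGet arr 0 < fslGet arr 1 then (1, 0) else (0, 1))).1
        (fslLoopB arr (List.range' 2 c)
          (if fslGet arr 0 < fslGet arr 1 then (1, 0) else (0, 1))).2 := by
  induction c with
  | zero =>
      simp only [List.range'_zero, fslLoopB]
      by_cases h : fslGet arr 0 < fslGet arr 1
      · rw [if_pos h]
        refine ⟨⟨by omega, ?_, ?_⟩, ⟨by omega, by omega, ?_, ?_⟩⟩
        · intro j hj; interval_cases j
          · exact le_of_lt h
          · exact le_refl _
        · intro j hj
          have : j = 0 := by omega
          rw [this]; exact h
        · intro j hj hjm; interval_cases j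
          · exact le_refl _
          · omega
        · intro j hj hjm; omega
      · rw [if_neg h]
        refine ⟨⟨by omega, ?_, ?_⟩, ⟨by omega, by omega, ?_, ?_⟩⟩
        · intro j hj; interval_cases j
          · exact le_refl _
          · exact le_of_not_gt h
        · intro j hj; omega
        · intro j hj hjm; interval_cases j
          · omega
          · exact le_refl _
        · intro j hj hjm; omega
  | succ c ih =>
      have hcat : List.range' 2 (c + 1) = List.range' 2 c ++ [2 + c] := by
        simpa using (List.range'_concat (s := 2) (n := c) (step := 1))
      rw [hcat, fslLoopB_append]
      set p := fslLoopB arr (List.range' 2 c)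
        (if fslGet arr 0 < fslGet arr 1 then (1, 0) else (0, 1)) with hp
      obtain ⟨⟨hfk, hfle, hflt⟩, hsk, hsf, hsle, hslt⟩ := ih
      simp only
      by_cases h : fslGet arr p.1 < fslGet arr (2 + c)
      · rw [if_pos h]
        refine ⟨⟨by omega, ?_, ?_⟩, ⟨by omega, by omega, ?_, ?_⟩⟩
        · intro j hj
          rcases Nat.lt_or_ge j (c + 2) with hj' | hj'
          · exact le_of_lt (lt_of_le_of_lt (hfle j (by omega)) h)
          · have : j = 2 + c := by omega
            rw [this]
        · intro j hj
          exact lt_of_le_of_lt (hfle j (by omega)) h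
        · intro j hj hjm
          exact hfle j (by omega)
        · intro j hj _
          exact hflt j hj
      · rw [if_neg h]
        by_cases h2 : (2 + c) ≠ p.1 ∧ fslGet arr p.2 < fslGet arr (2 + c)
        · rw [if_pos h2]
          refine ⟨⟨by omega, ?_, hflt⟩, ⟨by omega, by omega, ?_, ?_⟩⟩
          · intro j hj
            rcases Nat.lt_or_ge j (c + 2) with hj' | hj'
            · exact hfle j (by omega)
            · have : j = 2 + c := by omega
              rw [this]; exact le_of_not_gt h
          · intro j hj hjm
            rcases Nat.lt_or_ge j (c + 2) with hj' | hj'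
            · exact le_of_lt (lt_of_le_of_lt (hsle j (by omega) hjm) h2.2)
            · have : j = 2 + c := by omega
              rw [this]
          · intro j hj hjm
            exact lt_of_le_of_lt (hsle j (by omega) hjm) h2.2
        · rw [if_neg h2]
          have hne : (2 + c) ≠ p.1 := by omega
          have hle2 : fslGet arr (2 + c) ≤ fslGet arr p.2 := by
            rcases not_and_or.mp h2 with h' | h'
            · exact absurd hne h'
            · exact le_of_not_gt h'
          refine ⟨⟨by omega, ?_, hflt⟩, ⟨by omega, hsf, ?_, hslt⟩⟩
          · intro j hj
            rcases Nat.lt_or_ge j (c + 2) with hj' | hj'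
            · exact hfle j (by omega)
            · have : j = 2 + c := by omega
              rw [this]; exact le_of_not_gt h
          · intro j hj hjm
            rcases Nat.lt_or_ge j (c + 2) with hj' | hj'
            · exact hsle j (by omega) hjm
            · have : j = 2 + c := by omega
              rw [this]; exact hle2

-- ===== VERDICT (by name: the statement is the Claim_ definition above) =====
theorem find_the_second_largest_spec : Claim_equal_find_the_second_largest := by
  intro arr _
  unfold Spec_find_the_second_largest find_the_second_largest find_the_second_largest_alt
  by_cases hlen : arr.length < 2
  · rw [if_pos hlen, if_pos hlen]
  · rw [if_neg hlen, if_neg hlen]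
    have hn : 2 ≤ arr.length := by omega
    -- A's two loops
    have hA1 := fslLoop1_inv arr (arr.length - 1)
    set m := fslLoop1 arr (List.range' 1 (arr.length - 1)) 0 with hm
    have hA2 := fslLoop2_inv arr m arr.length hn
    set s := fslLoop2 arr m (List.range' 0 arr.length) (if m = 0 then 1 else 0) with hs
    -- B's loop
    have hB := fslLoopB_inv arr (arr.length - 2)
    have hk : arr.length - 2 + 1 = arr.length - 1 := by omega
    rw [hk] at hB
    set p := fslLoopB arr (List.range' 2 (arr.length - 2))
      (if fslGet arr 0 < fslGet arr 1 then (1, 0) else (0, 1)) with hpd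
    obtain ⟨hBf, hBs⟩ := hB
    have hmf : m = p.1 := IsFstMax_unique hA1 hBf
    rw [hmf] at hA2
    have hss : s = p.2 := IsSnd_unique hA2 hBs
    exact congrArg (fun n : Nat => (n : Int)) hss
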